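-- pv_equiv track=rewrite | github.com/MaxGrossmann/mbpt_benchmark | qsgw_benchmark/qsgw_workflow/utils/helper.py | combine_n_lists
-- ===== SOURCE A (Python) =====
-- def combine_n_lists(sym_path_list):
--     """
--     Converts a list with broken up symmetry paths, e.g., [["X", "K", "W"], ["G", "L", "U"]]
--     to a combined list usable for the x-tick labels of a band structure plot.
--     Example: [["X", "K", "W"], ["G", "L", "U"]] -> ["X", "K", "W,G", "L", "U"]
--     INPUT:
--         sym_path_list:      List with broken up symmetry paths, e.g., [["X", "K", "W"], ["G", "L", "U"]]
--     OUTPUT: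
--         combined :          List for the x-tick labels of a band structure plot
--     """
--     if len(sym_path_list) == 1:
--         return sym_path_list[0]
--     combined = sym_path_list[0][:-1]
--     for i in range(len(sym_path_list) - 1):
--         combined.append(sym_path_list[i][-1] + "," + sym_path_list[i + 1][0])
--         combined += sym_path_list[i + 1][1:-1]
--     combined.append(sym_path_list[-1][-1])
--     return combined
-- ===== SOURCE B (Python) =====
-- def combine_n_lists(sym_path_list):
--     *init, last = sym_path_list
--     if not init:
--         return last
--     prev = combine_n_lists(init)
--     # splice the last group into the combined prefix: fuse its opening point
--     # into the prefix's final tick, then its interior points, then its closing point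
--     return prev[:-1] + [prev[-1] + "," + last[0]] + last[1:-1] + [last[-1]]
-- ===== Notes on version B (the rewrite author's own statement) =====
-- stated objective: alternative
-- what changed: B replaces A's left-to-right loop over boundary indices (range(len-1) with random access spl[i]/spl[i+1] and a deferred final tail append) by structural recursion from the right: it recursively combines all groups but the last and then splices the last group in by rewriting the final label of the recursive result, so the accumulated value is always a complete answer for the prefix instead of A's tail-deferred partial list.
import Mathlib
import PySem

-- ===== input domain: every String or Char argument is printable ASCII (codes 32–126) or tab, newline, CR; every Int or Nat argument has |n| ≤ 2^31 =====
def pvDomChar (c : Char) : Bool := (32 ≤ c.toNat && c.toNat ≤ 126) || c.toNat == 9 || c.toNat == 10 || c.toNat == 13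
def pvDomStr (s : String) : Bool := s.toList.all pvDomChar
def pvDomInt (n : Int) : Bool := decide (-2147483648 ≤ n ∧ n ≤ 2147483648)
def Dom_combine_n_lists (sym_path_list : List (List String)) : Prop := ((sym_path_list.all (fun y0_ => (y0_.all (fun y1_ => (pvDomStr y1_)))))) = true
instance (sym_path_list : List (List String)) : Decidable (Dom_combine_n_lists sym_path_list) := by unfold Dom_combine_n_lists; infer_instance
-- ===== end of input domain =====

-- B replaces A's index loop with a deferred final tail by structural recursion from the right
-- (combine the prefix, then splice the last group in, rewriting the prefix's final label);
-- objective: alternative decomposition. Equivalence is about the return value.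

-- ===== PORT A =====
-- loop body of A's 'for i in range(len(sym_path_list) - 1)'
def pvFA (spl : List (List String)) (c : List String) (i : Int) : List String :=
  (c ++ [PySem.List.pyGetD (PySem.List.pyGetD spl i []) (-1) "" ++ "," ++
         PySem.List.pyGetD (PySem.List.pyGetD spl (i + 1) []) 0 ""])
  ++ PySem.List.slice (PySem.List.pyGetD spl (i + 1) []) (some 1) (some (-1))

-- 'combined' after A's loop (before the final append)
def pvAcore (spl : List (List String)) : List String :=
  (PySem.List.pyRange 0 ((spl.length : Int) - 1) 1).foldl (pvFA spl)
    (PySem.List.slice (PySem.List.pyGetD spl 0 []) none (some (-1)))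

def combine_n_lists (sym_path_list : List (List String)) : List String :=
  if sym_path_list.length = 1 then
    PySem.List.pyGetD sym_path_list 0 []
  else
    pvAcore sym_path_list ++
      [PySem.List.pyGetD (PySem.List.pyGetD sym_path_list (-1) []) (-1) ""]

-- ===== PORT B =====
-- '*init, last = sym_path_list'; if init is empty return last; otherwise recursively combine
-- init and splice last in: prev[:-1] + [prev[-1] + "," + last[0]] + last[1:-1] + [last[-1]]
def combine_n_lists_alt (sym_path_list : List (List String)) : List String :=
  if h : sym_path_list = [] then []   -- Python's unpacking raises ValueError here; outside Pre_
  else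
    if sym_path_list.dropLast = [] then sym_path_list.getLast h
    else
      PySem.List.slice (combine_n_lists_alt sym_path_list.dropLast) none (some (-1)) ++
        [PySem.List.pyGetD (combine_n_lists_alt sym_path_list.dropLast) (-1) "" ++ "," ++
           PySem.List.pyGetD (sym_path_list.getLast h) 0 ""] ++
        PySem.List.slice (sym_path_list.getLast h) (some 1) (some (-1)) ++
        [PySem.List.pyGetD (sym_path_list.getLast h) (-1) ""]
  termination_by sym_path_list.length
  decreasing_by
    simp only [List.length_dropLast]
    have := List.length_pos_iff.mpr h
    omega

-- ===== PRECONDITION & SPEC =====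
-- Pre_ excludes exactly the inputs where Python A raises IndexError: the empty outer list, and
-- an empty inner group when there is more than one group.
def Pre_combine_n_lists (sym_path_list : List (List String)) : Prop :=
  sym_path_list ≠ [] ∧ (sym_path_list.length = 1 ∨ ∀ g ∈ sym_path_list, g ≠ [])
instance (sym_path_list : List (List String)) : Decidable (Pre_combine_n_lists sym_path_list) := by
  unfold Pre_combine_n_lists; infer_instance

def pvWitness_combine_n_lists : List (List String) := [["X", "K", "W"], ["G", "L", "U"]]

def Spec_combine_n_lists (sym_path_list : List (List String)) (out : List String) : Prop := out = combine_n_lists_alt sym_path_list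
instance (sym_path_list : List (List String)) (out : List String) : Decidable (Spec_combine_n_lists sym_path_list out) := by unfold Spec_combine_n_lists; infer_instance

-- ===== CLAIM (what is proved, stated in full; the proofs are below) =====
def Claim_equal_combine_n_lists : Prop := ∀ (sym_path_list : List (List String)), Dom_combine_n_lists sym_path_list → Pre_combine_n_lists sym_path_list → Spec_combine_n_lists sym_path_list (combine_n_lists sym_path_list)

-- ===== LEMMAS AND PROOFS =====

-- xs[i] under append, index inside xs
lemma pvGetD_append_left {α : Type} (xs ys : List α) (i : Int) (d : α)
    (h0 : 0 ≤ i) (h1 : i < xs.length) :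
    PySem.List.pyGetD (xs ++ ys) i d = PySem.List.pyGetD xs i d := by
  rw [PySem.List.pyGetD_eq_getElem _ d h0 (by simp; omega),
      PySem.List.pyGetD_eq_getElem _ d h0 (by exact_mod_cast h1)]
  exact List.getElem_append_left (by omega)

lemma pvAcore_append (spl' : List (List String)) (g : List String) (h : spl' ≠ []) :
    pvAcore (spl' ++ [g]) =
      pvAcore spl' ++
        [PySem.List.pyGetD (PySem.List.pyGetD spl' (-1) []) (-1) "" ++ "," ++
           PySem.List.pyGetD g 0 ""] ++
        PySem.List.slice g (some 1) (some (-1)) := by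
  have hlen : 1 ≤ spl'.length := List.length_pos_iff.mpr h
  have hL : ((spl' ++ [g]).length : Int) - 1 = ((spl'.length : Int) - 1) + 1 := by
    simp
  have hsplit : PySem.List.pyRange 0 (((spl'.length : Int) - 1) + 1) 1
      = PySem.List.pyRange 0 ((spl'.length : Int) - 1) 1 ++ [(spl'.length : Int) - 1] := by
    exact PySem.List.pyRange_one_succ_right (by omega)
  have hinit : PySem.List.pyGetD (spl' ++ [g]) 0 ([] : List String)
      = PySem.List.pyGetD spl' 0 [] :=
    pvGetD_append_left _ _ _ _ le_rfl (by omega)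
  have hcong : (PySem.List.pyRange 0 ((spl'.length : Int) - 1) 1).foldl (pvFA (spl' ++ [g]))
        (PySem.List.slice (PySem.List.pyGetD spl' 0 []) none (some (-1)))
      = (PySem.List.pyRange 0 ((spl'.length : Int) - 1) 1).foldl (pvFA spl')
        (PySem.List.slice (PySem.List.pyGetD spl' 0 []) none (some (-1))) := by
    apply PySem.List.foldl_congr_mem
    intro acc i hi
    rcases PySem.List.mem_pyRange_one.mp hi with ⟨h0, h1⟩
    unfold pvFA
    rw [pvGetD_append_left _ _ _ _ h0 (by omega),
        pvGetD_append_left _ _ _ _ (by omega) (by omega)]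
  have hlast1 : PySem.List.pyGetD (spl' ++ [g]) ((spl'.length : Int) - 1) ([] : List String)
      = PySem.List.pyGetD spl' (-1) [] := by
    rw [pvGetD_append_left spl' [g] _ ([] : List String) (by omega) (by omega),
        PySem.List.pyGetD_neg_one _ _ h,
        PySem.List.pyGetD_eq_getElem _ ([] : List String) (by omega) (by omega)]
    rw [List.getLast_eq_getElem]
    congr 1
    omega
  have hlast2 : PySem.List.pyGetD (spl' ++ [g]) (((spl'.length : Int) - 1) + 1) ([] : List String) = g := by
    have : ((spl'.length : Int) - 1) + 1 = ((spl'.length : Nat) : Int) := by omega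
    rw [this, PySem.List.pyGetD_natCast]
    simp [List.getD]
  unfold pvAcore
  rw [hL, hsplit, List.foldl_append, hinit, hcong]
  simp only [List.foldl_cons, List.foldl_nil]
  simp only [pvFA]
  rw [hlast1, hlast2]

-- A's result decomposes as its loop core plus the final appended label
lemma pvA_decomp (spl : List (List String)) (h : spl ≠ [])
    (hne : ∀ g ∈ spl, g ≠ []) :
    combine_n_lists spl
      = pvAcore spl ++ [PySem.List.pyGetD (PySem.List.pyGetD spl (-1) []) (-1) ""] := by
  unfold combine_n_lists
  by_cases h1 : spl.length = 1
  · obtain ⟨g0, rfl⟩ := List.length_eq_one_iff.mp h1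
    have hg0 : g0 ≠ [] := hne g0 (by simp)
    rw [if_pos (show ([g0] : List (List String)).length = 1 by simp)]
    unfold pvAcore
    rw [show ((([g0] : List (List String)).length : Int) - 1) = 0 by simp,
        PySem.List.pyRange_one_eq_nil le_rfl]
    simp only [List.foldl_nil, PySem.List.pyGetD_zero_cons,
      PySem.List.slice_to_neg_one,
      PySem.List.pyGetD_neg_one ([g0]) ([] : List String) (by simp),
      List.getLast_singleton]
    rw [PySem.List.pyGetD_neg_one g0 "" hg0]
    exact (List.dropLast_append_getLast hg0).symm
  · rw [if_neg h1]

-- ===== VERDICT (by name: the statement is the Claim_ definition above) =====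
theorem combine_n_lists_spec : Claim_equal_combine_n_lists := by
  intro spl hdom hpre
  unfold Spec_combine_n_lists
  rcases hpre with ⟨hne, hpre2⟩
  induction spl using List.reverseRecOn with
  | nil => exact absurd rfl hne
  | append_singleton spl' g ih =>
    by_cases h' : spl' = []
    · subst h'
      rw [combine_n_lists_alt]
      simp only [List.nil_append, List.dropLast_singleton, List.getLast_singleton]
      unfold combine_n_lists
      simp
    · have hall : ∀ x ∈ spl' ++ [g], x ≠ [] := by
        rcases hpre2 with h1 | h1
        · exfalso
          rw [List.length_append] at h1
          simp at h1
          exact absurd h1 h'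
        · exact h1
      have hdom' : Dom_combine_n_lists spl' := by
        unfold Dom_combine_n_lists at hdom ⊢
        simp only [List.all_append, Bool.and_eq_true] at hdom
        exact hdom.1
      have ihe : combine_n_lists spl' = combine_n_lists_alt spl' := by
        refine ih hdom' h' (Or.inr ?_)
        intro x hx
        exact hall x (List.mem_append_left _ hx)
      rw [combine_n_lists_alt]
      rw [dif_neg (by simp), List.dropLast_concat, if_neg h', List.getLast_concat]
      rw [← ihe, pvA_decomp spl' h'
        (fun x hx => hall x (List.mem_append_left _ hx))]
      rw [PySem.List.slice_to_neg_one, List.dropLast_concat,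
          PySem.List.pyGetD_neg_one_append_singleton]
      rw [pvA_decomp (spl' ++ [g]) (by simp) hall, pvAcore_append spl' g h',
          PySem.List.pyGetD_neg_one_append_singleton]
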